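-- pv_equiv track=rewrite | github.com/DavidDataScientist/PySeismicUnix | zau/tools/generate_man_pages.py | parse_help_text
-- ===== SOURCE A (Python) =====
-- from typing import Dict, List, Optional, Tuple
--
-- def parse_help_text(program_name: str, help_text: str) -> Dict[str, str]:
--     """
--     Parse SU help text into structured sections
--     SU programs typically have:
--     - Description (first line or after program name)
--     - Usage line
--     - Required parameters
--     - Optional parameters
--     - Examples
--     """
--     sections = {
--         "name": program_name,
--         "description": "",
--         "synopsis": "",
--         "required": "",
--         "optional": "",
--         "examples": "",
--         "notes": "",
--         "raw": help_text
--     }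
--
--     lines = help_text.split('\n')
--     if not lines:
--         return sections
--
--     # Extract description (usually first non-empty line or after program name)
--     desc_lines = []
--     in_desc = False
--     for i, line in enumerate(lines):
--         line_stripped = line.strip()
--         if not line_stripped:
--             continue
--
--         # Skip program name line
--         if line_stripped.upper() == program_name.upper() or line_stripped.startswith(program_name.upper() + ":"):
--             in_desc = True
--             continue
--
--         # Description usually comes before "Required" or "Optional"
--         if "required" in line_stripped.lower() or "optional" in line_stripped.lower():
--             break
--
--         if in_desc or (i < 10 and not any(keyword in line_stripped.lower() for keyword in ["usage", "stdin", "stdout", "parameters"])):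
--             desc_lines.append(line_stripped)
--             in_desc = True
--
--     sections["description"] = " ".join(desc_lines[:3])  # First few lines
--
--     # Extract synopsis (look for usage patterns)
--     for line in lines:
--         if "stdin" in line.lower() or "stdout" in line.lower() or "<" in line or ">" in line:
--             sections["synopsis"] = line.strip()
--             break
--
--     # Extract required/optional parameters and other sections
--     in_section = None
--     current_section = []
--
--     for line in lines:
--         line_stripped = line.strip()
--         line_lower = line_stripped.lower()
--
--         # Check for section headers
--         if "required parameters" in line_lower and len(line_stripped) < 50:
--             if in_section:
--                 sections[in_section] = "\n".join(current_section).strip()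
--             in_section = "required"
--             current_section = []
--             continue
--         elif "optional parameters" in line_lower and len(line_stripped) < 50:
--             if in_section:
--                 sections[in_section] = "\n".join(current_section).strip()
--             in_section = "optional"
--             current_section = []
--             continue
--         elif ("examples" in line_lower or "example:" in line_lower) and len(line_stripped) < 50:
--             if in_section:
--                 sections[in_section] = "\n".join(current_section).strip()
--             in_section = "examples"
--             current_section = []
--             continue
--         elif ("notes" in line_lower or "note:" in line_lower) and len(line_stripped) < 50:
--             if in_section:
--                 sections[in_section] = "\n".join(current_section).strip()
--             in_section = "notes"
--             current_section = []
--             continue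
--
--         # Collect content for current section
--         if in_section and line_stripped:
--             current_section.append(line_stripped)
--
--     # Save last section
--     if in_section:
--         sections[in_section] = "\n".join(current_section).strip()
--
--     return sections
-- ===== SOURCE B (Python) =====
-- # Staged pipeline instead of A's flag-driven loops: description via two index searches
-- # (break index, trigger index) plus a filter; synopsis via next(); sections by splitting
-- # the lines into header-delimited segments and loading them into a last-wins dict.
--
-- _DESC_KEYWORDS = ("usage", "stdin", "stdout", "parameters")
--
--
-- def parse_help_text(program_name: str, help_text: str):
--     lines = help_text.split('\n')
--     stripped = [l.strip() for l in lines]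
--     pu = program_name.upper()
--
--     def is_prog(ls):
--         return ls.upper() == pu or ls.startswith(pu + ":")
--
--     def breaks(ls):
--         ll = ls.lower()
--         return bool(ls) and not is_prog(ls) and ("required" in ll or "optional" in ll)
--
--     def triggers(i, ls):
--         ll = ls.lower()
--         return bool(ls) and (is_prog(ls) or
--                              (i < 10 and not any(k in ll for k in _DESC_KEYWORDS)))
--
--     # description: cut at the first required/optional line, start at the first line
--     # that would turn description collection on, keep nonempty non-program-name lines
--     cut = next((i for i, ls in enumerate(stripped) if breaks(ls)), len(stripped))
--     prefix = stripped[:cut]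
--     start = next((i for i, ls in enumerate(prefix) if triggers(i, ls)), len(prefix))
--     desc = [ls for ls in prefix[start:] if ls and not is_prog(ls)]
--     description = " ".join(desc[:3])
--
--     # synopsis: first matching raw line, stripped
--     synopsis = next((l.strip() for l in lines
--                      if "stdin" in l.lower() or "stdout" in l.lower()
--                      or "<" in l or ">" in l), "")
--
--     # sections: split the stripped lines into header-delimited segments
--     def header_of(ls):
--         if len(ls) >= 50:
--             return None
--         ll = ls.lower()
--         if "required parameters" in ll:
--             return "required"
--         if "optional parameters" in ll:
--             return "optional"
--         if "examples" in ll or "example:" in ll: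
--             return "examples"
--         if "notes" in ll or "note:" in ll:
--             return "notes"
--         return None
--
--     segments = []
--     open_seg = None
--     for ls in stripped:
--         h = header_of(ls)
--         if h is not None:
--             if open_seg is not None:
--                 segments.append(open_seg)
--             open_seg = (h, [])
--         elif open_seg is not None and ls:
--             open_seg = (open_seg[0], open_seg[1] + [ls])
--     if open_seg is not None:
--         segments.append(open_seg)
--
--     buckets = {}
--     for key, content in segments:  # later segments overwrite earlier ones
--         buckets[key] = "\n".join(content).strip()
--
--     return {
--         "name": program_name,
--         "description": description,
--         "synopsis": synopsis,
--         "required": buckets.get("required", ""),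
--         "optional": buckets.get("optional", ""),
--         "examples": buckets.get("examples", ""),
--         "notes": buckets.get("notes", ""),
--         "raw": help_text,
--     }
-- ===== Notes on version B (the rewrite author's own statement) =====
-- stated objective: alternative
-- what changed: A runs three stateful loops with flags and breaks (description with in_desc, synopsis with break, section headers flushed into the result dict); B is a staged pipeline: the description is two index searches (break index, trigger index) plus a filter and take-3, the synopsis is a next() first-match search, and the sections are built by splitting the stripped lines into header-delimited segments and loading them into a last-wins bucket dict.
import Mathlib
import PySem

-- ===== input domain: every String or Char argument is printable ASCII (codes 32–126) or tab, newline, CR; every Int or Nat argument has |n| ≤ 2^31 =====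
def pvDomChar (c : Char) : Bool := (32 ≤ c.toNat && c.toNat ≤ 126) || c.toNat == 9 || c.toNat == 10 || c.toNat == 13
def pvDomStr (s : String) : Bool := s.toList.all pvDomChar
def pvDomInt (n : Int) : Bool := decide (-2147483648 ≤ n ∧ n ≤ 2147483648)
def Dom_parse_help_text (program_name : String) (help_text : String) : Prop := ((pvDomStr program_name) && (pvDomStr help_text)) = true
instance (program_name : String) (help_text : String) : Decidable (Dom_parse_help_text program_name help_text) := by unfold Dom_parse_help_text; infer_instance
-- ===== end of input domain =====

-- B replaces A's flag-driven loops by a staged pipeline: two index searches plus a filter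
-- for the description, a first-match search for the synopsis, and a split of the lines into
-- header-delimited segments loaded into a last-wins dict (objective: alternative decomposition).

-- ===== PORT A =====

-- A's first loop (its `break` on a required/optional line is ported as returning the accumulator)
def descLoopA (program_name : String) : List (Int × String) → Bool → List String → List String
  | [], _, desc_lines => desc_lines
  | (i, line) :: rest, in_desc, desc_lines =>
    let ls := PySem.Str.strip line
    if ls = "" then descLoopA program_name rest in_desc desc_lines
    else if PySem.Str.upper ls = PySem.Str.upper program_name
            ∨ PySem.Str.startswith ls (PySem.Str.upper program_name ++ ":") = true then
      descLoopA program_name rest true desc_lines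
    else if PySem.Str.isIn "required" (PySem.Str.lower ls) = true
            ∨ PySem.Str.isIn "optional" (PySem.Str.lower ls) = true then
      desc_lines
    else if in_desc = true
            ∨ (i < 10 ∧ (["usage", "stdin", "stdout", "parameters"].any
                 (fun kw => PySem.Str.isIn kw (PySem.Str.lower ls))) = false) then
      descLoopA program_name rest true (desc_lines ++ [ls])
    else descLoopA program_name rest in_desc desc_lines

-- A's second loop (the first matching line sets the synopsis, then `break`)
def synLoopA (sections : PySem.Dict String String) : List String → PySem.Dict String String
  | [] => sections
  | line :: rest =>
    if PySem.Str.isIn "stdin" (PySem.Str.lower line) = true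
       ∨ PySem.Str.isIn "stdout" (PySem.Str.lower line) = true
       ∨ PySem.Str.isIn "<" line = true ∨ PySem.Str.isIn ">" line = true then
      sections.insert "synopsis" (PySem.Str.strip line)
    else synLoopA sections rest

-- one iteration of A's third loop; `if in_section:` is Python truthiness, and in_section is
-- always None or one of the nonempty strings "required"/"optional"/"examples"/"notes"
def secStepA (st : Option String × List String × PySem.Dict String String)
    (line : String) : Option String × List String × PySem.Dict String String :=
  let in_section := st.1
  let current_section := st.2.1
  let sections := st.2.2
  let ls := PySem.Str.strip line
  let ll := PySem.Str.lower ls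
  let flush : PySem.Dict String String → PySem.Dict String String := fun d =>
    match in_section with
    | some k => d.insert k (PySem.Str.strip (PySem.Str.join "\n" current_section))
    | none => d
  if PySem.Str.isIn "required parameters" ll = true ∧ PySem.Str.len ls < 50 then
    (some "required", [], flush sections)
  else if PySem.Str.isIn "optional parameters" ll = true ∧ PySem.Str.len ls < 50 then
    (some "optional", [], flush sections)
  else if (PySem.Str.isIn "examples" ll = true ∨ PySem.Str.isIn "example:" ll = true)
          ∧ PySem.Str.len ls < 50 then
    (some "examples", [], flush sections)
  else if (PySem.Str.isIn "notes" ll = true ∨ PySem.Str.isIn "note:" ll = true)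
          ∧ PySem.Str.len ls < 50 then
    (some "notes", [], flush sections)
  else if in_section ≠ none ∧ ¬ ls = "" then
    (in_section, current_section ++ [ls], sections)
  else st

def parse_help_text (program_name : String) (help_text : String) : List (String × String) :=
  let sections : PySem.Dict String String :=
    PySem.Dict.ofList [("name", program_name), ("description", ""), ("synopsis", ""),
      ("required", ""), ("optional", ""), ("examples", ""), ("notes", ""), ("raw", help_text)]
  let lines := (PySem.Str.split? help_text "\n").getD []  -- sep "\n" ≠ "": split? is exact here
  if lines = [] then sections.items
  else
    let desc_lines := descLoopA program_name (PySem.List.enumerate lines 0) false []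
    let sections := sections.insert "description"
        (PySem.Str.join " " (PySem.List.slice desc_lines none (some 3)))
    let sections := synLoopA sections lines
    let st := lines.foldl secStepA (none, [], sections)
    let sections := match st.1 with
      | some k => st.2.2.insert k (PySem.Str.strip (PySem.Str.join "\n" st.2.1))
      | none => st.2.2
    sections.items

-- ===== PORT B =====

-- Source B's is_prog
def isProgB (pu ls : String) : Bool :=
  PySem.Str.upper ls == pu || PySem.Str.startswith ls (pu ++ ":")

-- Source B's breaks
def breaksB (pu ls : String) : Bool :=
  !(ls == "") && !(isProgB pu ls) &&
    (PySem.Str.isIn "required" (PySem.Str.lower ls) || PySem.Str.isIn "optional" (PySem.Str.lower ls))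

-- Source B's triggers
def triggersB (pu : String) (i : Int) (ls : String) : Bool :=
  !(ls == "") && (isProgB pu ls ||
    (decide (i < 10) && !(["usage", "stdin", "stdout", "parameters"].any
       (fun k => PySem.Str.isIn k (PySem.Str.lower ls)))))

-- Source B's header_of
def headerOfB (ls : String) : Option String :=
  if 50 ≤ PySem.Str.len ls then none
  else
    let ll := PySem.Str.lower ls
    if PySem.Str.isIn "required parameters" ll then some "required"
    else if PySem.Str.isIn "optional parameters" ll then some "optional"
    else if PySem.Str.isIn "examples" ll || PySem.Str.isIn "example:" ll then some "examples"
    else if PySem.Str.isIn "notes" ll || PySem.Str.isIn "note:" ll then some "notes"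
    else none

-- Source B's segment-building loop body (closed segments, currently open segment)
def segStepB (st : List (String × List String) × Option (String × List String))
    (ls : String) : List (String × List String) × Option (String × List String) :=
  match headerOfB ls with
  | some h =>
    (match st.2 with
     | some seg => st.1 ++ [seg]
     | none => st.1,
     some (h, []))
  | none =>
    match st.2 with
    | some seg => if ls ≠ "" then (st.1, some (seg.1, seg.2 ++ [ls])) else st
    | none => st

def parse_help_text_alt (program_name : String) (help_text : String) : List (String × String) :=
  let lines := (PySem.Str.split? help_text "\n").getD []  -- sep "\n" ≠ "": split? is exact here
  let stripped := lines.map PySem.Str.strip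
  let pu := PySem.Str.upper program_name
  -- description: cut index, trigger index, filter, first three
  let cut := (stripped.findIdx? (breaksB pu)).getD stripped.length
  let pre := stripped.take cut
  let start := ((PySem.List.enumerate pre 0).findIdx?
      (fun p => triggersB pu p.1 p.2)).getD pre.length
  let desc := (pre.drop start).filter (fun ls => !(ls == "") && !(isProgB pu ls))
  let description := PySem.Str.join " " (PySem.List.slice desc none (some 3))
  -- synopsis: first matching raw line, stripped
  let synopsis := ((lines.find? (fun l =>
      PySem.Str.isIn "stdin" (PySem.Str.lower l) || PySem.Str.isIn "stdout" (PySem.Str.lower l) ||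
      PySem.Str.isIn "<" l || PySem.Str.isIn ">" l)).map PySem.Str.strip).getD ""
  -- sections: header-delimited segments, then a last-wins bucket dict
  let st := stripped.foldl segStepB ([], none)
  let segments := match st.2 with
    | some seg => st.1 ++ [seg]
    | none => st.1
  let buckets := segments.foldl
    (fun d p => PySem.Dict.insert d p.1 (PySem.Str.strip (PySem.Str.join "\n" p.2)))
    PySem.Dict.empty
  [("name", program_name),
   ("description", description),
   ("synopsis", synopsis),
   ("required", buckets.getD "required" ""),
   ("optional", buckets.getD "optional" ""),
   ("examples", buckets.getD "examples" ""),
   ("notes", buckets.getD "notes" ""),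
   ("raw", help_text)]

-- ===== PRECONDITION & SPEC =====
def Spec_parse_help_text (program_name : String) (help_text : String) (out : List (String × String)) : Prop := out = parse_help_text_alt program_name help_text
instance (program_name : String) (help_text : String) (out : List (String × String)) : Decidable (Spec_parse_help_text program_name help_text out) := by unfold Spec_parse_help_text; infer_instance

-- ===== CLAIM (what is proved, stated in full; the proofs are below) =====
def Claim_equal_parse_help_text : Prop := ∀ (program_name : String) (help_text : String), Dom_parse_help_text program_name help_text → Spec_parse_help_text program_name help_text (parse_help_text program_name help_text)

-- ===== LEMMAS AND PROOFS =====

-- the fixed 8-key shape A's dict keeps throughout (keys are overwritten in place)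
def pvMk8 (pn D S r o e n raw : String) : PySem.Dict String String :=
  PySem.Dict.mk [("name", pn), ("description", D), ("synopsis", S),
    ("required", r), ("optional", o), ("examples", e), ("notes", n), ("raw", raw)]

lemma pv_base (pn raw : String) :
    (PySem.Dict.ofList [("name", pn), ("description", ""), ("synopsis", ""),
      ("required", ""), ("optional", ""), ("examples", ""), ("notes", ""), ("raw", raw)]
      : PySem.Dict String String) = pvMk8 pn "" "" "" "" "" "" raw := rfl

lemma pv_items (pn D S r o e n raw : String) :
    (pvMk8 pn D S r o e n raw).items = [("name", pn), ("description", D), ("synopsis", S),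
      ("required", r), ("optional", o), ("examples", e), ("notes", n), ("raw", raw)] := rfl

lemma pv_ins_desc (pn D S r o e n raw v : String) :
    (pvMk8 pn D S r o e n raw).insert "description" v = pvMk8 pn v S r o e n raw := rfl
lemma pv_ins_syn (pn D S r o e n raw v : String) :
    (pvMk8 pn D S r o e n raw).insert "synopsis" v = pvMk8 pn D v r o e n raw := rfl
lemma pv_ins_req (pn D S r o e n raw v : String) :
    (pvMk8 pn D S r o e n raw).insert "required" v = pvMk8 pn D S v o e n raw := rfl
lemma pv_ins_opt (pn D S r o e n raw v : String) :
    (pvMk8 pn D S r o e n raw).insert "optional" v = pvMk8 pn D S r v e n raw := rfl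
lemma pv_ins_exa (pn D S r o e n raw v : String) :
    (pvMk8 pn D S r o e n raw).insert "examples" v = pvMk8 pn D S r o v n raw := rfl
lemma pv_ins_not (pn D S r o e n raw v : String) :
    (pvMk8 pn D S r o e n raw).insert "notes" v = pvMk8 pn D S r o e v raw := rfl

-- Bool ↔ Prop bridges for B's predicates against A's conditions
lemma pv_isProgB_iff (pu ls : String) :
    isProgB pu ls = true ↔ (PySem.Str.upper ls = pu ∨ PySem.Str.startswith ls (pu ++ ":") = true) := by
  simp [isProgB]

lemma pv_breaksB_iff (pu ls : String) :
    breaksB pu ls = true ↔ (¬ ls = "" ∧ ¬ isProgB pu ls = true ∧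
      (PySem.Str.isIn "required" (PySem.Str.lower ls) = true
        ∨ PySem.Str.isIn "optional" (PySem.Str.lower ls) = true)) := by
  simp [breaksB, and_assoc]

lemma pv_triggersB_iff (pu : String) (i : Int) (ls : String) :
    triggersB pu i ls = true ↔ (¬ ls = "" ∧ (isProgB pu ls = true ∨
      (i < 10 ∧ (["usage", "stdin", "stdout", "parameters"].any
         (fun kw => PySem.Str.isIn kw (PySem.Str.lower ls))) = false))) := by
  simp [triggersB]

-- the pre-break prefix of the stripped lines
def pvPre (pu : String) (lines : List String) : List String :=
  (lines.map PySem.Str.strip).takeWhile (fun ls => !(breaksB pu ls))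

-- the in_desc = true tail of A's first loop: every nonempty non-program line before the break
def pvDescTrue (pu : String) (lines : List String) : List String :=
  (pvPre pu lines).filter (fun ls => !(ls == "") && !(isProgB pu ls))

-- B's description pipeline, generalized to an arbitrary enumerate start index k
def pvDescFalse (pu : String) (lines : List String) (k : Int) : List String :=
  let pre := pvPre pu lines
  let start := ((PySem.List.enumerate pre k).findIdx?
      (fun p => triggersB pu p.1 p.2)).getD pre.length
  (pre.drop start).filter (fun ls => !(ls == "") && !(isProgB pu ls))

lemma pv_take_findIdx {α : Type} (p : α → Bool) (l : List α) :
    l.take ((l.findIdx? p).getD l.length) = l.takeWhile (fun x => !(p x)) := by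
  induction l with
  | nil => rfl
  | cons a t ih =>
    by_cases h : p a = true
    · simp [List.findIdx?_cons, h]
    · have h' : p a = false := by simpa using h
      simp only [List.findIdx?_cons, h', List.takeWhile_cons, Bool.not_false, if_true]
      cases hf : t.findIdx? p <;> simp [hf] at ih ⊢ <;> simpa [hf] using ih

lemma pv_getD_map_succ (o : Option Nat) (n : Nat) :
    ((o.map (· + 1)).getD (n + 1)) = o.getD n + 1 := by cases o <;> rfl

lemma pv_eq_false_of_not {b : Bool} {P : Prop} (hiff : b = true ↔ P) (h : ¬ P) : b = false :=
  Bool.eq_false_iff.2 (fun hb => h (hiff.1 hb))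

lemma pv_ne_true_of_false {b : Bool} (h : b = false) : ¬ b = true :=
  fun hb => Bool.false_ne_true (h ▸ hb)

lemma pv_pre_cons_true (pu l : String) (t : List String)
    (hb : breaksB pu (PySem.Str.strip l) = true) : pvPre pu (l :: t) = [] := by
  simp [pvPre, hb]

lemma pv_pre_cons_false (pu l : String) (t : List String)
    (hb : breaksB pu (PySem.Str.strip l) = false) :
    pvPre pu (l :: t) = PySem.Str.strip l :: pvPre pu t := by
  simp [pvPre, hb]

lemma pv_descTrue_cons (pu l : String) (t : List String)
    (hb : breaksB pu (PySem.Str.strip l) = false) :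
    pvDescTrue pu (l :: t)
      = (if (!(PySem.Str.strip l == "") && !(isProgB pu (PySem.Str.strip l))) = true
         then [PySem.Str.strip l] else []) ++ pvDescTrue pu t := by
  simp only [pvDescTrue, pv_pre_cons_false pu l t hb, List.filter_cons]
  split_ifs with hK <;> simp

lemma pv_descFalse_cons_break (pu l : String) (t : List String) (k : Int)
    (hb : breaksB pu (PySem.Str.strip l) = true) : pvDescFalse pu (l :: t) k = [] := by
  simp [pvDescFalse, pv_pre_cons_true pu l t hb, PySem.List.enumerate_nil]

lemma pv_descFalse_cons_trigger (pu l : String) (t : List String) (k : Int)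
    (hb : breaksB pu (PySem.Str.strip l) = false)
    (ht : triggersB pu k (PySem.Str.strip l) = true) :
    pvDescFalse pu (l :: t) k
      = (PySem.Str.strip l :: pvPre pu t).filter (fun x => !(x == "") && !(isProgB pu x)) := by
  simp [pvDescFalse, pv_pre_cons_false pu l t hb, PySem.List.enumerate_cons,
    List.findIdx?_cons, ht]

lemma pv_descFalse_cons_skip (pu l : String) (t : List String) (k : Int)
    (hb : breaksB pu (PySem.Str.strip l) = false)
    (ht : triggersB pu k (PySem.Str.strip l) = false) :
    pvDescFalse pu (l :: t) k = pvDescFalse pu t (k + 1) := by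
  simp only [pvDescFalse, pv_pre_cons_false pu l t hb, PySem.List.enumerate_cons,
    List.findIdx?_cons, ht, Bool.false_eq_true, if_false, List.length_cons]
  rw [pv_getD_map_succ, List.drop_succ_cons]

lemma pv_descTrue_eq (pn : String) (lines : List String) (k : Int) (dl : List String) :
    descLoopA pn (PySem.List.enumerate lines k) true dl
      = dl ++ pvDescTrue (PySem.Str.upper pn) lines := by
  induction lines generalizing k dl with
  | nil => simp [PySem.List.enumerate_nil, descLoopA, pvDescTrue, pvPre]
  | cons l t ih =>
    rw [PySem.List.enumerate_cons]
    simp only [descLoopA]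
    split_ifs with h0 h1 h2 h4
    · have hb : breaksB (PySem.Str.upper pn) (PySem.Str.strip l) = false :=
        pv_eq_false_of_not (pv_breaksB_iff _ _) (fun hc => hc.1 h0)
      rw [ih, pv_descTrue_cons _ l t hb]
      simp [h0]
    · have hp : isProgB (PySem.Str.upper pn) (PySem.Str.strip l) = true :=
        (pv_isProgB_iff _ _).2 h1
      have hb : breaksB (PySem.Str.upper pn) (PySem.Str.strip l) = false :=
        pv_eq_false_of_not (pv_breaksB_iff _ _) (fun hc => hc.2.1 hp)
      rw [ih, pv_descTrue_cons _ l t hb]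
      simp [hp]
    · have hp : isProgB (PySem.Str.upper pn) (PySem.Str.strip l) = false :=
        pv_eq_false_of_not (pv_isProgB_iff _ _) h1
      have hb : breaksB (PySem.Str.upper pn) (PySem.Str.strip l) = true :=
        (pv_breaksB_iff _ _).2 ⟨h0, pv_ne_true_of_false hp, h2⟩
      simp [pvDescTrue, pv_pre_cons_true _ l t hb]
    · have hp : isProgB (PySem.Str.upper pn) (PySem.Str.strip l) = false :=
        pv_eq_false_of_not (pv_isProgB_iff _ _) h1
      have hb : breaksB (PySem.Str.upper pn) (PySem.Str.strip l) = false :=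
        pv_eq_false_of_not (pv_breaksB_iff _ _) (fun hc => h2 hc.2.2)
      rw [ih, pv_descTrue_cons _ l t hb]
      simp [h0, hp]
    · exact absurd (Or.inl trivial) h4

lemma pv_descFalse_eq (pn : String) (lines : List String) (k : Int) (dl : List String) :
    descLoopA pn (PySem.List.enumerate lines k) false dl
      = dl ++ pvDescFalse (PySem.Str.upper pn) lines k := by
  induction lines generalizing k dl with
  | nil => simp [PySem.List.enumerate_nil, descLoopA, pvDescFalse, pvPre]
  | cons l t ih =>
    rw [PySem.List.enumerate_cons]
    simp only [descLoopA]
    split_ifs with h0 h1 h2 h4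
    · -- blank line: skipped, index advances
      have hb : breaksB (PySem.Str.upper pn) (PySem.Str.strip l) = false :=
        pv_eq_false_of_not (pv_breaksB_iff _ _) (fun hc => hc.1 h0)
      have ht : triggersB (PySem.Str.upper pn) k (PySem.Str.strip l) = false :=
        pv_eq_false_of_not (pv_triggersB_iff _ _ _) (fun hc => hc.1 h0)
      rw [ih, pv_descFalse_cons_skip _ l t k hb ht]
    · -- program-name line: skipped, but collection is on from here
      have hp : isProgB (PySem.Str.upper pn) (PySem.Str.strip l) = true :=
        (pv_isProgB_iff _ _).2 h1
      have hb : breaksB (PySem.Str.upper pn) (PySem.Str.strip l) = false :=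
        pv_eq_false_of_not (pv_breaksB_iff _ _) (fun hc => hc.2.1 hp)
      have ht : triggersB (PySem.Str.upper pn) k (PySem.Str.strip l) = true :=
        (pv_triggersB_iff _ _ _).2 ⟨h0, Or.inl hp⟩
      rw [pv_descTrue_eq, pv_descFalse_cons_trigger _ l t k hb ht]
      simp [pvDescTrue, hp]
    · -- required/optional line: the break
      have hp : isProgB (PySem.Str.upper pn) (PySem.Str.strip l) = false :=
        pv_eq_false_of_not (pv_isProgB_iff _ _) h1
      have hb : breaksB (PySem.Str.upper pn) (PySem.Str.strip l) = true :=
        (pv_breaksB_iff _ _).2 ⟨h0, pv_ne_true_of_false hp, h2⟩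
      rw [pv_descFalse_cons_break _ l t k hb]
      simp
    · -- a collected line: collection turns on, the head is kept
      have hp : isProgB (PySem.Str.upper pn) (PySem.Str.strip l) = false :=
        pv_eq_false_of_not (pv_isProgB_iff _ _) h1
      have hb : breaksB (PySem.Str.upper pn) (PySem.Str.strip l) = false :=
        pv_eq_false_of_not (pv_breaksB_iff _ _) (fun hc => h2 hc.2.2)
      have hkw : k < 10 ∧ (["usage", "stdin", "stdout", "parameters"].any
          (fun kw => PySem.Str.isIn kw (PySem.Str.lower (PySem.Str.strip l)))) = false :=
        h4.resolve_left (by simp)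
      have ht : triggersB (PySem.Str.upper pn) k (PySem.Str.strip l) = true :=
        (pv_triggersB_iff _ _ _).2 ⟨h0, Or.inr hkw⟩
      rw [pv_descTrue_eq, pv_descFalse_cons_trigger _ l t k hb ht]
      simp [pvDescTrue, h0, hp]
    · -- nothing fires: skipped, index advances
      have hp : isProgB (PySem.Str.upper pn) (PySem.Str.strip l) = false :=
        pv_eq_false_of_not (pv_isProgB_iff _ _) h1
      have hb : breaksB (PySem.Str.upper pn) (PySem.Str.strip l) = false :=
        pv_eq_false_of_not (pv_breaksB_iff _ _) (fun hc => h2 hc.2.2)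
      have ht : triggersB (PySem.Str.upper pn) k (PySem.Str.strip l) = false :=
        pv_eq_false_of_not (pv_triggersB_iff _ _ _)
          (fun hc => h4 (Or.inr (hc.2.resolve_left (pv_ne_true_of_false hp))))
      rw [ih, pv_descFalse_cons_skip _ l t k hb ht]

-- synopsis: A's early-exit loop is B's first-match search
lemma pv_synLoopA_eq (pn D r o e n raw : String) (lines : List String) :
    synLoopA (pvMk8 pn D "" r o e n raw) lines
      = pvMk8 pn D (((lines.find? (fun l =>
          PySem.Str.isIn "stdin" (PySem.Str.lower l) || PySem.Str.isIn "stdout" (PySem.Str.lower l) ||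
          PySem.Str.isIn "<" l || PySem.Str.isIn ">" l)).map PySem.Str.strip).getD "")
          r o e n raw := by
  induction lines with
  | nil => rfl
  | cons l t ih =>
    rw [synLoopA]
    by_cases h : PySem.Str.isIn "stdin" (PySem.Str.lower l) = true
        ∨ PySem.Str.isIn "stdout" (PySem.Str.lower l) = true
        ∨ PySem.Str.isIn "<" l = true ∨ PySem.Str.isIn ">" l = true
    · have hb : (PySem.Str.isIn "stdin" (PySem.Str.lower l) || PySem.Str.isIn "stdout" (PySem.Str.lower l) ||
          PySem.Str.isIn "<" l || PySem.Str.isIn ">" l) = true := by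
        simp only [Bool.or_eq_true]
        rcases h with h | h | h | h
        · exact Or.inl (Or.inl (Or.inl h))
        · exact Or.inl (Or.inl (Or.inr h))
        · exact Or.inl (Or.inr h)
        · exact Or.inr h
      rw [if_pos h, List.find?_cons_of_pos (p := fun l =>
          PySem.Str.isIn "stdin" (PySem.Str.lower l) || PySem.Str.isIn "stdout" (PySem.Str.lower l) ||
          PySem.Str.isIn "<" l || PySem.Str.isIn ">" l) hb, pv_ins_syn]
      rfl
    · have hbf : ¬ ((PySem.Str.isIn "stdin" (PySem.Str.lower l) || PySem.Str.isIn "stdout" (PySem.Str.lower l) ||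
          PySem.Str.isIn "<" l || PySem.Str.isIn ">" l) = true) := by
        simp only [Bool.or_eq_true]
        rintro (((hx | hx) | hx) | hx)
        · exact h (Or.inl hx)
        · exact h (Or.inr (Or.inl hx))
        · exact h (Or.inr (Or.inr (Or.inl hx)))
        · exact h (Or.inr (Or.inr (Or.inr hx)))
      rw [if_neg h, List.find?_cons_of_neg (p := fun l =>
          PySem.Str.isIn "stdin" (PySem.Str.lower l) || PySem.Str.isIn "stdout" (PySem.Str.lower l) ||
          PySem.Str.isIn "<" l || PySem.Str.isIn ">" l) hbf]
      exact ih

-- sections: the bucket dict a list of closed segments denotes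
def pvBucketsOf (segs : List (String × List String)) : PySem.Dict String String :=
  segs.foldl (fun d p => PySem.Dict.insert d p.1 (PySem.Str.strip (PySem.Str.join "\n" p.2)))
    PySem.Dict.empty

def pvG (segs : List (String × List String)) (k : String) : String :=
  (pvBucketsOf segs).getD k ""

def pvKeyOK4 (k : String) : Prop :=
  k = "required" ∨ k = "optional" ∨ k = "examples" ∨ k = "notes"

def pvSegOK (st : List (String × List String) × Option (String × List String)) : Prop :=
  (∀ p ∈ st.1, pvKeyOK4 p.1) ∧ (∀ seg, st.2 = some seg → pvKeyOK4 seg.1)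

-- the A-state a B-state denotes: open key, open content, the 8-key dict with the buckets
def pvAbs (pn D S raw : String)
    (st : List (String × List String) × Option (String × List String)) :
    Option String × List String × PySem.Dict String String :=
  (st.2.map Prod.fst, (st.2.map Prod.snd).getD [],
    pvMk8 pn D S (pvG st.1 "required") (pvG st.1 "optional")
      (pvG st.1 "examples") (pvG st.1 "notes") raw)

lemma pv_bucketsOf_append (segs : List (String × List String)) (x : String × List String) :
    pvBucketsOf (segs ++ [x])
      = (pvBucketsOf segs).insert x.1 (PySem.Str.strip (PySem.Str.join "\n" x.2)) := by
  simp [pvBucketsOf, List.foldl_append]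

lemma pv_flush (pn D S raw k : String) (c : List String)
    (segs : List (String × List String)) (hk : pvKeyOK4 k) :
    (pvMk8 pn D S (pvG segs "required") (pvG segs "optional") (pvG segs "examples")
        (pvG segs "notes") raw).insert k (PySem.Str.strip (PySem.Str.join "\n" c))
    = pvMk8 pn D S (pvG (segs ++ [(k, c)]) "required") (pvG (segs ++ [(k, c)]) "optional")
        (pvG (segs ++ [(k, c)]) "examples") (pvG (segs ++ [(k, c)]) "notes") raw := by
  rcases hk with rfl | rfl | rfl | rfl <;>
    simp [pvG, pv_bucketsOf_append, PySem.Dict.getD_insert,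
      pv_ins_req, pv_ins_opt, pv_ins_exa, pv_ins_not]

lemma pv_headerOfB_keyOK (ls k : String) (h : headerOfB ls = some k) : pvKeyOK4 k := by
  simp only [headerOfB] at h
  split_ifs at h <;> simp only [Option.some.injEq] at h <;>
    first
      | exact absurd h (by simp)
      | (subst h; simp [pvKeyOK4])

lemma pv_segStepB_ok (st : List (String × List String) × Option (String × List String))
    (ls : String) (h : pvSegOK st) : pvSegOK (segStepB st ls) := by
  obtain ⟨segs, op⟩ := st
  obtain ⟨h1, h2⟩ := h
  rw [segStepB]
  cases hH : headerOfB ls with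
  | some hd =>
    rcases op with _ | ⟨k, c⟩
    · exact ⟨h1, fun seg hseg => by
        rw [Option.some.injEq] at hseg; subst hseg; exact pv_headerOfB_keyOK ls hd hH⟩
    · refine ⟨?_, fun seg hseg => by
        rw [Option.some.injEq] at hseg; subst hseg; exact pv_headerOfB_keyOK ls hd hH⟩
      intro p hp
      rcases List.mem_append.1 hp with hp | hp
      · exact h1 p hp
      · rw [List.mem_singleton] at hp; subst hp; exact h2 _ rfl
  | none =>
    rcases op with _ | ⟨k, c⟩
    · exact ⟨h1, h2⟩
    · by_cases hls : ls ≠ ""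
      · simp only [if_pos hls]
        exact ⟨h1, fun seg hseg => by
          rw [Option.some.injEq] at hseg; subst hseg; exact h2 (k, c) rfl⟩
      · simp only [if_neg hls]
        exact ⟨h1, h2⟩

lemma pv_headerOfB_req (line : String)
    (hc1 : PySem.Str.isIn "required parameters" (PySem.Str.lower (PySem.Str.strip line)) = true
      ∧ PySem.Str.len (PySem.Str.strip line) < 50) :
    headerOfB (PySem.Str.strip line) = some "required" := by
  obtain ⟨h, hlen⟩ := hc1
  unfold headerOfB
  rw [if_neg (by omega : ¬ 50 ≤ PySem.Str.len (PySem.Str.strip line))]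
  dsimp only
  rw [if_pos h]

lemma pv_headerOfB_opt (line : String)
    (hc1 : ¬ (PySem.Str.isIn "required parameters" (PySem.Str.lower (PySem.Str.strip line)) = true
      ∧ PySem.Str.len (PySem.Str.strip line) < 50))
    (hc2 : PySem.Str.isIn "optional parameters" (PySem.Str.lower (PySem.Str.strip line)) = true
      ∧ PySem.Str.len (PySem.Str.strip line) < 50) :
    headerOfB (PySem.Str.strip line) = some "optional" := by
  obtain ⟨h, hlen⟩ := hc2
  unfold headerOfB
  rw [if_neg (by omega : ¬ 50 ≤ PySem.Str.len (PySem.Str.strip line))]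
  dsimp only
  rw [if_neg (fun hr => hc1 ⟨hr, hlen⟩), if_pos h]

lemma pv_headerOfB_exa (line : String)
    (hc1 : ¬ (PySem.Str.isIn "required parameters" (PySem.Str.lower (PySem.Str.strip line)) = true
      ∧ PySem.Str.len (PySem.Str.strip line) < 50))
    (hc2 : ¬ (PySem.Str.isIn "optional parameters" (PySem.Str.lower (PySem.Str.strip line)) = true
      ∧ PySem.Str.len (PySem.Str.strip line) < 50))
    (hc3 : (PySem.Str.isIn "examples" (PySem.Str.lower (PySem.Str.strip line)) = true
        ∨ PySem.Str.isIn "example:" (PySem.Str.lower (PySem.Str.strip line)) = true)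
      ∧ PySem.Str.len (PySem.Str.strip line) < 50) :
    headerOfB (PySem.Str.strip line) = some "examples" := by
  obtain ⟨h, hlen⟩ := hc3
  unfold headerOfB
  rw [if_neg (by omega : ¬ 50 ≤ PySem.Str.len (PySem.Str.strip line))]
  dsimp only
  rw [if_neg (fun hr => hc1 ⟨hr, hlen⟩), if_neg (fun hr => hc2 ⟨hr, hlen⟩),
    if_pos (by rw [Bool.or_eq_true]; exact h)]

lemma pv_headerOfB_not (line : String)
    (hc1 : ¬ (PySem.Str.isIn "required parameters" (PySem.Str.lower (PySem.Str.strip line)) = true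
      ∧ PySem.Str.len (PySem.Str.strip line) < 50))
    (hc2 : ¬ (PySem.Str.isIn "optional parameters" (PySem.Str.lower (PySem.Str.strip line)) = true
      ∧ PySem.Str.len (PySem.Str.strip line) < 50))
    (hc3 : ¬ ((PySem.Str.isIn "examples" (PySem.Str.lower (PySem.Str.strip line)) = true
        ∨ PySem.Str.isIn "example:" (PySem.Str.lower (PySem.Str.strip line)) = true)
      ∧ PySem.Str.len (PySem.Str.strip line) < 50))
    (hc4 : (PySem.Str.isIn "notes" (PySem.Str.lower (PySem.Str.strip line)) = true
        ∨ PySem.Str.isIn "note:" (PySem.Str.lower (PySem.Str.strip line)) = true)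
      ∧ PySem.Str.len (PySem.Str.strip line) < 50) :
    headerOfB (PySem.Str.strip line) = some "notes" := by
  obtain ⟨h, hlen⟩ := hc4
  unfold headerOfB
  rw [if_neg (by omega : ¬ 50 ≤ PySem.Str.len (PySem.Str.strip line))]
  dsimp only
  rw [if_neg (fun hr => hc1 ⟨hr, hlen⟩), if_neg (fun hr => hc2 ⟨hr, hlen⟩),
    if_neg (by rw [Bool.or_eq_true]; exact fun hx => hc3 ⟨hx, hlen⟩),
    if_pos (by rw [Bool.or_eq_true]; exact h)]

lemma pv_headerOfB_none (line : String)
    (hc1 : ¬ (PySem.Str.isIn "required parameters" (PySem.Str.lower (PySem.Str.strip line)) = true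
      ∧ PySem.Str.len (PySem.Str.strip line) < 50))
    (hc2 : ¬ (PySem.Str.isIn "optional parameters" (PySem.Str.lower (PySem.Str.strip line)) = true
      ∧ PySem.Str.len (PySem.Str.strip line) < 50))
    (hc3 : ¬ ((PySem.Str.isIn "examples" (PySem.Str.lower (PySem.Str.strip line)) = true
        ∨ PySem.Str.isIn "example:" (PySem.Str.lower (PySem.Str.strip line)) = true)
      ∧ PySem.Str.len (PySem.Str.strip line) < 50))
    (hc4 : ¬ ((PySem.Str.isIn "notes" (PySem.Str.lower (PySem.Str.strip line)) = true
        ∨ PySem.Str.isIn "note:" (PySem.Str.lower (PySem.Str.strip line)) = true)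
      ∧ PySem.Str.len (PySem.Str.strip line) < 50)) :
    headerOfB (PySem.Str.strip line) = none := by
  by_cases hlen50 : 50 ≤ PySem.Str.len (PySem.Str.strip line)
  · unfold headerOfB
    rw [if_pos hlen50]
  · have hlen : PySem.Str.len (PySem.Str.strip line) < 50 := by omega
    unfold headerOfB
    rw [if_neg hlen50]
    dsimp only
    rw [if_neg (fun hr => hc1 ⟨hr, hlen⟩), if_neg (fun hr => hc2 ⟨hr, hlen⟩),
      if_neg (by rw [Bool.or_eq_true]; exact fun hx => hc3 ⟨hx, hlen⟩),
      if_neg (by rw [Bool.or_eq_true]; exact fun hx => hc4 ⟨hx, hlen⟩)]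

lemma pv_sec_step (pn D S raw : String) (segs : List (String × List String))
    (op : Option (String × List String)) (line : String)
    (hop : ∀ seg, op = some seg → pvKeyOK4 seg.1) :
    secStepA (pvAbs pn D S raw (segs, op)) line
      = pvAbs pn D S raw (segStepB (segs, op) (PySem.Str.strip line)) := by
  by_cases hc1 : PySem.Str.isIn "required parameters" (PySem.Str.lower (PySem.Str.strip line)) = true
      ∧ PySem.Str.len (PySem.Str.strip line) < 50
  · rw [secStepA]
    rw [if_pos hc1]
    rw [segStepB, pv_headerOfB_req line hc1]
    rcases op with _ | ⟨k, c⟩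
    · rfl
    · simp only [pvAbs, Option.map_some, Option.getD_some]
      rw [pv_flush pn D S raw k c segs (hop _ rfl)]
  · by_cases hc2 : PySem.Str.isIn "optional parameters" (PySem.Str.lower (PySem.Str.strip line)) = true
        ∧ PySem.Str.len (PySem.Str.strip line) < 50
    · rw [secStepA, if_neg hc1, if_pos hc2, segStepB, pv_headerOfB_opt line hc1 hc2]
      rcases op with _ | ⟨k, c⟩
      · rfl
      · simp only [pvAbs, Option.map_some, Option.getD_some]
        rw [pv_flush pn D S raw k c segs (hop _ rfl)]
    · by_cases hc3 : (PySem.Str.isIn "examples" (PySem.Str.lower (PySem.Str.strip line)) = true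
          ∨ PySem.Str.isIn "example:" (PySem.Str.lower (PySem.Str.strip line)) = true)
          ∧ PySem.Str.len (PySem.Str.strip line) < 50
      · rw [secStepA, if_neg hc1, if_neg hc2, if_pos hc3, segStepB,
          pv_headerOfB_exa line hc1 hc2 hc3]
        rcases op with _ | ⟨k, c⟩
        · rfl
        · simp only [pvAbs, Option.map_some, Option.getD_some]
          rw [pv_flush pn D S raw k c segs (hop _ rfl)]
      · by_cases hc4 : (PySem.Str.isIn "notes" (PySem.Str.lower (PySem.Str.strip line)) = true
            ∨ PySem.Str.isIn "note:" (PySem.Str.lower (PySem.Str.strip line)) = true)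
            ∧ PySem.Str.len (PySem.Str.strip line) < 50
        · rw [secStepA, if_neg hc1, if_neg hc2, if_neg hc3, if_pos hc4, segStepB,
            pv_headerOfB_not line hc1 hc2 hc3 hc4]
          rcases op with _ | ⟨k, c⟩
          · rfl
          · simp only [pvAbs, Option.map_some, Option.getD_some]
            rw [pv_flush pn D S raw k c segs (hop _ rfl)]
        · rw [secStepA, if_neg hc1, if_neg hc2, if_neg hc3, if_neg hc4, segStepB,
            pv_headerOfB_none line hc1 hc2 hc3 hc4]
          rcases op with _ | ⟨k, c⟩
          · dsimp only
            rw [if_neg (by rintro ⟨h, -⟩; exact h rfl)]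
          · dsimp only
            by_cases h0 : PySem.Str.strip line = ""
            · rw [if_neg (by rintro ⟨-, hx⟩; exact hx h0), if_neg (by simpa using h0)]
            · rw [if_pos ⟨by simp [pvAbs], h0⟩, if_pos h0]
              simp [pvAbs]

lemma pv_segFold_ok (L : List String)
    (st : List (String × List String) × Option (String × List String)) (h : pvSegOK st) :
    pvSegOK (L.foldl segStepB st) := by
  induction L generalizing st with
  | nil => exact h
  | cons x t ih => exact ih _ (pv_segStepB_ok st x h)

lemma pv_sec_fold (pn D S raw : String) (lines : List String) :
    ∀ st, pvSegOK st →
      lines.foldl secStepA (pvAbs pn D S raw st)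
        = pvAbs pn D S raw ((lines.map PySem.Str.strip).foldl segStepB st) := by
  induction lines with
  | nil => intro st _; rfl
  | cons l t ih =>
    intro st hk
    obtain ⟨segs, op⟩ := st
    rw [List.map_cons, List.foldl_cons, List.foldl_cons,
      pv_sec_step pn D S raw segs op l hk.2]
    exact ih _ (pv_segStepB_ok (segs, op) _ hk)

lemma pv_init (pn D S raw : String) :
    ((none : Option String), ([] : List String), pvMk8 pn D S "" "" "" "" raw)
      = pvAbs pn D S raw ([], none) := rfl

lemma pv_sec_fold_init (pn D S raw : String) (lines : List String) :
    lines.foldl secStepA (none, [], pvMk8 pn D S "" "" "" "" raw)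
      = pvAbs pn D S raw ((lines.map PySem.Str.strip).foldl segStepB ([], none)) := by
  rw [pv_init pn D S raw]
  exact pv_sec_fold pn D S raw lines ([], none) ⟨by simp, by simp⟩

-- ===== VERDICT (by name: the statement is the Claim_ definition above) =====
theorem parse_help_text_spec : Claim_equal_parse_help_text := by
  unfold Claim_equal_parse_help_text
  intro pn ht _
  unfold Spec_parse_help_text parse_help_text parse_help_text_alt
  generalize (PySem.Str.split? ht "\n").getD [] = lines
  by_cases hnil : lines = []
  · subst hnil; rfl
  · rw [if_neg hnil]
    dsimp only
    rw [pv_base, pv_descFalse_eq pn lines 0 [], List.nil_append, pv_ins_desc, pv_synLoopA_eq,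
      pv_take_findIdx]
    simp only [pvDescFalse, pvPre]
    rw [pv_sec_fold_init pn]
    set E := (lines.map PySem.Str.strip).foldl segStepB ([], none) with hE
    have hok : pvSegOK E := pv_segFold_ok (lines.map PySem.Str.strip) ([], none) ⟨by simp, by simp⟩
    clear_value E
    obtain ⟨segs, op⟩ := E
    rcases op with _ | ⟨k, c⟩
    · simp only [pvAbs, Option.map_none, Option.getD_none]
      rw [pv_items]
      simp only [pvG, pvBucketsOf]
    · simp only [pvAbs, Option.map_some, Option.getD_some]
      rw [pv_flush pn _ _ _ k c segs (hok.2 (k, c) rfl)]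
      rw [pv_items]
      simp only [pvG, pvBucketsOf]
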